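-- pv_equiv track=rewrite | github.com/joe-rac/shopify | get_shopifycommontup_list_graphql.py | getBestAddress
-- ===== SOURCE A (Python) =====
-- def getBestAddress(addresses):
--
--     # 1/3/2025. example for how this function works is #15172 for Hutech company. addresses passed in has 6 elements. address returned is
--     #           {'address1': '25691 Atlantic Ocean Dr.,', 'address2': 'Unit B-17', 'city': 'Lake Forest', 'province': 'California', 'country': 'United States', 'phone': '(949) 859-5511',
--     #           'company': 'Hutech Corporation'}
--
--     address = {}
--
--     addr_items_to_list = {}
--     for adr in addresses:
--         for item,v in adr.items():
--             if v is None: v = ''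
--             lst = addr_items_to_list.get(item,[])
--             if not lst:
--                 addr_items_to_list[item] = lst
--             lst.append(v)
--
--     for item_key,lst in  addr_items_to_list.items():
--         item_to_cnt_map = {}
--         for item in lst:
--             item_to_cnt_map[item] = item_to_cnt_map.get(item,0) + 1
--         if len(item_to_cnt_map) > 1 and '' in  item_to_cnt_map:
--             # 2/28/2025. added this block for #15569. It had item_to_cnt_map of {'': 3, '(848) 248-0424': 1, '8482480424': 1} for item_key:'phone'
--             #            the most common valyue is blank but we don't want to choose that one.
--             del item_to_cnt_map['']
--         max_cnt = max(item_to_cnt_map.values())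
--         items_with_max_cnt = []
--         for item,cnt in item_to_cnt_map.items():
--             if item is None: item = ''
--             if cnt == max_cnt:
--                 items_with_max_cnt.append(item)
--         if len(items_with_max_cnt) == 1:
--             address[item_key] = items_with_max_cnt[0] if items_with_max_cnt[0] else ''
--         else:
--             items_with_max_cnt = sorted(items_with_max_cnt)
--             max_len = max( [len(i) for i in items_with_max_cnt] )
--             for item in items_with_max_cnt:
--                 if len(item) == max_len:
--                     address[item_key] = item if item else ''
--
--     return address
-- ===== SOURCE B (Python) =====
-- def getBestAddress(addresses):
--     # One keyed reduction: per field key, count normalized values (None -> '') in a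
--     # single pass, drop '' when it competes with real values, then pick the winner
--     # with one max over the composite key (count, length, value).
--     counts = {}
--     for adr in addresses:
--         for k, v in adr.items():
--             c = counts.get(k)
--             if c is None:
--                 c = {}
--                 counts[k] = c
--             val = '' if v is None else v
--             c[val] = c.get(val, 0) + 1
--     address = {}
--     for k, c in counts.items():
--         if len(c) > 1 and '' in c:
--             del c['']
--         address[k] = max(c.items(), key=lambda kv: (kv[1], len(kv[0]), kv[0]))[0]
--     return address
-- ===== Notes on version B (the rewrite author's own statement) =====
-- stated objective: simpler
-- what changed: B counts normalized values per field key directly into nested counters in one pass (no intermediate per-key value lists) and picks each winner with a single max over the composite key (count, len(value), value), replacing A's find-max-count, collect-ties, sort, find-max-length, overwrite-loop cascade.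
import Mathlib
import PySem

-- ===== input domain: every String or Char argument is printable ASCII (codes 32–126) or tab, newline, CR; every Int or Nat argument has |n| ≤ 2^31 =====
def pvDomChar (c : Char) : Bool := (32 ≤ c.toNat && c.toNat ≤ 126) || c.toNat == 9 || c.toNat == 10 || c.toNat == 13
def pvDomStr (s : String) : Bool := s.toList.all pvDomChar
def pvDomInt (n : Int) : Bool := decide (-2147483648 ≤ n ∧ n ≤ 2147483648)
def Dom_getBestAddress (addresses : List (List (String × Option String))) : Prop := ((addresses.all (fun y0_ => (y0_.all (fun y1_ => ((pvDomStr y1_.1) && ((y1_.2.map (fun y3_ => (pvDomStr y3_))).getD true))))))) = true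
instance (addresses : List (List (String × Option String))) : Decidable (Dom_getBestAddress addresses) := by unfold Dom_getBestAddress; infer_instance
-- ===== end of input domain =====

-- B differs from A by counting normalized values per key directly (no intermediate
-- per-key value lists) and picking each winner with a single composite-key maximum
-- instead of A's max-count / collect-ties / sort / max-length / overwrite cascade;
-- objective: simpler.

-- ===== PORT A =====
-- one iteration of A's second loop ('for item_key,lst in addr_items_to_list.items()')
def pvStepA (address : PySem.Dict String String) (p : String × List String) : PySem.Dict String String :=
  -- item_to_cnt_map built value by value ('if item is None' is dead: items are strings)
  let m0 : PySem.Dict String Int :=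
    p.2.foldl (fun m item => m.insert item (m.getD item 0 + 1)) PySem.Dict.empty
  let m := if 1 < m0.size ∧ m0.contains "" = true then m0.erase "" else m0
  -- max(values): the map is nonempty on every reachable input (lst is nonempty)
  let maxCnt := (PySem.List.max? m.values (fun c => c)).getD 0
  let itemsMax := m.items.foldl (fun acc q => if q.2 == maxCnt then acc ++ [q.1] else acc) ([] : List String)
  if itemsMax.length == 1 then
    -- items_with_max_cnt[0]: in range under the length-1 guard
    let x := (PySem.List.pyGet? itemsMax 0).getD ""
    address.insert p.1 (if x == "" then "" else x)          -- 'x if x else '''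
  else
    let srt := PySem.List.sorted itemsMax (fun s => s) false
    let maxLen := (PySem.List.max? (srt.map (fun i => PySem.Str.len i)) (fun n => n)).getD 0
    srt.foldl (fun addr item =>
      if PySem.Str.len item == maxLen then
        addr.insert p.1 (if item == "" then "" else item)   -- 'item if item else '''
      else addr) address

def getBestAddress (addresses : List (List (String × Option String))) : List (String × String) :=
  -- first loop: addr_items_to_list[item] is the list of all values seen for item
  -- (Python appends to the list object the dict already holds; net effect: append to the entry)
  let ail : PySem.Dict String (List String) :=
    addresses.foldl (fun d adr =>
      adr.foldl (fun d iv =>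
        d.insert iv.1 (d.getD iv.1 [] ++ [iv.2.getD ""])) d) PySem.Dict.empty
  (ail.items.foldl pvStepA PySem.Dict.empty).items

-- ===== PORT B =====
-- Python 'max(c.items(), key=lambda kv: (kv[1], len(kv[0]), kv[0]))':
-- tuple keys compare lexicographically; max keeps the earlier element on key ties
def pvKeyLt (b q : String × Int) : Bool :=
  b.2 < q.2 || (b.2 == q.2 &&
    (PySem.Str.len b.1 < PySem.Str.len q.1 || (PySem.Str.len b.1 == PySem.Str.len q.1 && decide (b.1 < q.1))))

def pvBestOf (c : PySem.Dict String Int) : String :=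
  match c.items.foldl (fun best q =>
      match best with
      | none => some q
      | some b => if pvKeyLt b q then some q else some b) none with
  | some b => b.1
  | none => ""   -- unreachable: every counter handed to max is nonempty

def getBestAddress_alt (addresses : List (List (String × Option String))) : List (String × String) :=
  let counts : PySem.Dict String (PySem.Dict String Int) :=
    addresses.foldl (fun cs adr =>
      adr.foldl (fun cs kv =>
        let c := cs.getD kv.1 PySem.Dict.empty
        let val := kv.2.getD ""
        cs.insert kv.1 (c.insert val (c.getD val 0 + 1))) cs) PySem.Dict.empty
  (counts.items.foldl (fun address kc =>
      let c := if 1 < kc.2.size ∧ kc.2.contains "" = true then kc.2.erase "" else kc.2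
      address.insert kc.1 (pvBestOf c)) PySem.Dict.empty).items

-- ===== PRECONDITION & SPEC =====
def Spec_getBestAddress (addresses : List (List (String × Option String))) (out : List (String × String)) : Prop := out = getBestAddress_alt addresses
instance (addresses : List (List (String × Option String))) (out : List (String × String)) : Decidable (Spec_getBestAddress addresses out) := by unfold Spec_getBestAddress; infer_instance

-- ===== CLAIM (what is proved, stated in full; the proofs are below) =====
def Claim_equal_getBestAddress : Prop := ∀ (addresses : List (List (String × Option String))), Dom_getBestAddress addresses → Spec_getBestAddress addresses (getBestAddress addresses)

-- ===== LEMMAS AND PROOFS =====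

-- composite key of B's max, as a lexicographic triple
def pvK (p : String × Int) : Lex (Int × Lex (Int × String)) :=
  toLex (p.2, toLex (PySem.Str.len p.1, p.1))

lemma pvKeyLt_iff (b q : String × Int) : pvKeyLt b q = true ↔ pvK b < pvK q := by
  simp [pvKeyLt, pvK, Prod.Lex.lt_iff]

lemma pvK_fst_eq_of_le_of_le {p q : String × Int} (h1 : pvK p ≤ pvK q) (h2 : pvK q ≤ pvK p) :
    p.1 = q.1 := by
  have h := le_antisymm h1 h2
  simp [pvK] at h
  exact h.2.2

-- the running-max fold of pvBestOf, from a non-none state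
lemma pvBest_go (l : List (String × Int)) (b : String × Int) :
    ∃ r, l.foldl (fun best q =>
        match best with
        | none => some q
        | some b => if pvKeyLt b q then some q else some b) (some b) = some r ∧
      r ∈ b :: l ∧ ∀ q ∈ b :: l, pvK q ≤ pvK r := by
  induction l generalizing b with
  | nil => exact ⟨b, rfl, by simp, by simp⟩
  | cons x t ih =>
    by_cases h : pvKeyLt b x = true
    · obtain ⟨r, hr, hmem, hmax⟩ := ih x
      refine ⟨r, by simpa [h], ?_, ?_⟩
      · rcases List.mem_cons.mp hmem with h' | h' <;> simp [List.mem_cons, h']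
      · intro q hq
        rcases List.mem_cons.mp hq with h' | h'
        · subst h'
          exact le_trans (le_of_lt ((pvKeyLt_iff q x).1 h)) (hmax x (by simp))
        · exact hmax q h'
    · obtain ⟨r, hr, hmem, hmax⟩ := ih b
      refine ⟨r, by simpa [h], ?_, ?_⟩
      · rcases List.mem_cons.mp hmem with h' | h' <;> simp [List.mem_cons, h']
      · intro q hq
        rcases List.mem_cons.mp hq with h' | h'
        · subst h'
          exact hmax q (by simp)
        · rcases List.mem_cons.mp h' with h'' | h''
          · subst h''
            have hx : pvK q ≤ pvK b := le_of_not_gt (fun hc => h ((pvKeyLt_iff b q).2 hc))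
            exact le_trans hx (hmax b (by simp))
          · exact hmax q (by simp [List.mem_cons, h''])

lemma pvBestOf_spec (c : PySem.Dict String Int) (h : c.items ≠ []) :
    ∃ cnt, (pvBestOf c, cnt) ∈ c.items ∧ ∀ q ∈ c.items, pvK q ≤ pvK (pvBestOf c, cnt) := by
  cases hc : c.items with
  | nil => exact absurd hc h
  | cons q t =>
    obtain ⟨r, hr, hmem, hmax⟩ := pvBest_go t q
    have hfold : c.items.foldl (fun best q =>
        match best with
        | none => some q
        | some b => if pvKeyLt b q then some q else some b) none = some r := by
      rw [hc]
      show List.foldl _ (some q) t = some r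
      exact hr
    have hb : pvBestOf c = r.1 := by
      unfold pvBestOf
      rw [hfold]
    refine ⟨r.2, ?_, ?_⟩
    · rw [hb]
      exact hmem
    · intro qq hqq
      rw [hb]
      exact hmax qq hqq

-- Pairwise-(≤) lists: every member is at most the last element
lemma le_getLast_of_pairwise {l : List String} (h : l.Pairwise (· ≤ ·)) {x : String}
    (hx : x ∈ l) (hne : l ≠ []) : x ≤ l.getLast hne := by
  induction l with
  | nil => exact absurd rfl hne
  | cons y ys ih =>
    cases ys with
    | nil =>
      simp at hx
      simp [hx]
    | cons z zs =>
      rw [List.getLast_cons (by simp : (z :: zs) ≠ [])]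
      rcases List.mem_cons.mp hx with hcase | hcase
      · subst hcase
        exact List.rel_of_pairwise_cons h (List.getLast_mem _)
      · exact ih (List.Pairwise.of_cons h) hcase (by simp)

-- writing the same key repeatedly leaves the last value
lemma foldl_insert_const_key (l : List String) (hne : l ≠ []) (k : String)
    (a : PySem.Dict String String) :
    l.foldl (fun ad i => ad.insert k i) a = a.insert k (l.getLast hne) := by
  induction l generalizing a with
  | nil => exact absurd rfl hne
  | cons x t ih =>
    cases t with
    | nil => rfl
    | cons y s =>
      rw [List.foldl_cons, ih (by simp) (a.insert k x), PySem.Dict.insert_insert_self,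
        List.getLast_cons (by simp : (y :: s) ≠ [])]

@[simp] lemma pv_ite_self (x : String) : (if x == "" then "" else x) = x := by
  by_cases h : x = "" <;> simp [h]

-- the dict A's/B's per-key work starts from: counts, '' dropped when it competes
def pvM (l : List String) : PySem.Dict String Int :=
  if 1 < (PySem.Dict.counter l).size ∧ (PySem.Dict.counter l).contains "" = true then
    (PySem.Dict.counter l).erase "" else PySem.Dict.counter l

lemma counter_items_ne_nil (l : List String) (hl : l ≠ []) :
    (PySem.Dict.counter l).items ≠ [] := by
  rw [PySem.Dict.items_counter]
  intro hcon
  rcases l with _ | ⟨x, xs⟩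
  · exact hl rfl
  · have hx : x ∈ PySem.Set.ofList (x :: xs) := by
      rw [PySem.Set.mem_ofList]
      simp
    rw [List.map_eq_nil_iff.mp hcon] at hx
    simp at hx

lemma pvM_items_ne_nil (l : List String) (hl : l ≠ []) : (pvM l).items ≠ [] := by
  unfold pvM
  split_ifs with hcond
  · -- erase '' removes at most one pair (counter keys are distinct), size > 1 remains
    have hnd : ((PySem.Dict.counter l).items.map (fun p => p.1)).Nodup :=
      PySem.Dict.nodup_keys_counter l
    have hcnt : List.countP (fun p => p.1 == "") (PySem.Dict.counter l).items ≤ 1 := by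
      have h1 := List.nodup_iff_count_le_one.mp hnd ""
      rw [List.count_eq_countP, List.countP_map] at h1
      simpa [Function.comp] using h1
    have hlen : 1 < (PySem.Dict.counter l).items.length := hcond.1
    have hpos : 0 < ((PySem.Dict.counter l).erase "").items.length := by
      show 0 < ((PySem.Dict.counter l).items.filter (fun p => !(p.1 == ""))).length
      rw [← List.countP_eq_length_filter]
      have hsplit := List.length_eq_countP_add_countP (p := fun p : String × Int => p.1 == "")
        (l := (PySem.Dict.counter l).items)
      have hbr : List.countP (fun p : String × Int => !(p.1 == "")) (PySem.Dict.counter l).items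
          = List.countP (fun a : String × Int => decide ¬(a.1 == "")) (PySem.Dict.counter l).items :=
        List.countP_congr (fun x _ => by simp)
      omega
    exact List.ne_nil_of_length_pos hpos
  · exact counter_items_ne_nil l hl

lemma pvK_le_intro {q : String × Int} {s : String} {cA : Int}
    (h : q.2 < cA ∨ (q.2 = cA ∧ (PySem.Str.len q.1 < PySem.Str.len s ∨
      (PySem.Str.len q.1 = PySem.Str.len s ∧ q.1 ≤ s)))) :
    pvK q ≤ pvK (s, cA) := by
  rcases h with h | ⟨h1, h | ⟨h2, h3⟩⟩
  · apply le_of_lt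
    rw [pvK, pvK, Prod.Lex.lt_iff]
    left
    simpa using h
  · apply le_of_lt
    rw [pvK, pvK, Prod.Lex.lt_iff]
    right
    refine ⟨by simpa using h1, ?_⟩
    rw [Prod.Lex.lt_iff]
    left
    simpa using h
  · rw [pvK, pvK, Prod.Lex.le_iff]
    right
    refine ⟨by simpa using h1, ?_⟩
    rw [Prod.Lex.le_iff]
    right
    exact ⟨by simpa using h2, by simpa using h3⟩

lemma pvBestOf_eq_of_max {m : PySem.Dict String Int} (hne : m.items ≠ []) {s : String} {cA : Int}
    (hmem : (s, cA) ∈ m.items) (hmax : ∀ q ∈ m.items, pvK q ≤ pvK (s, cA)) :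
    pvBestOf m = s := by
  obtain ⟨bc, hb, hbmax⟩ := pvBestOf_spec m hne
  exact (pvK_fst_eq_of_le_of_le (p := (s, cA)) (q := (pvBestOf m, bc))
    (hbmax _ hmem) (hmax _ hb)).symm

lemma pvStepA_eq_insert (a : PySem.Dict String String) (p : String × List String)
    (hne : p.2 ≠ []) : pvStepA a p = a.insert p.1 (pvBestOf (pvM p.2)) := by
  have hm0 := PySem.Dict.foldl_insert_getD_add_one_eq_counter (κ := String) p.2
  set m := pvM p.2 with hmdef
  have hMne : m.items ≠ [] := pvM_items_ne_nil p.2 hne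
  have hv : m.values ≠ [] := fun hcon => hMne (List.map_eq_nil_iff.mp hcon)
  obtain ⟨mc, hmc⟩ : ∃ mc, PySem.List.max? m.values (fun c => c) = some mc := by
    cases hx : PySem.List.max? m.values (fun c => c) with
    | none => exact absurd ((PySem.List.max?_eq_none_iff _ _).mp hx) hv
    | some y => exact ⟨y, rfl⟩
  have hmaxv : ∀ y ∈ m.values, y ≤ mc := PySem.List.max?_isMax hmc
  have hmcmem : mc ∈ m.values := PySem.List.max?_mem hmc
  set IM := (m.items.filter (fun q => q.2 == mc)).map Prod.fst with hIMdef
  obtain ⟨qm, hqm_mem, hqm2⟩ : ∃ q ∈ m.items, q.2 = mc := List.mem_map.mp hmcmem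
  have hIMne : IM ≠ [] := by
    intro hcon
    have hx : qm.1 ∈ IM :=
      List.mem_map_of_mem (List.mem_filter.mpr ⟨hqm_mem, beq_iff_eq.mpr hqm2⟩)
    rw [hcon] at hx
    simp at hx
  have hIMspec : ∀ x ∈ IM, (x, mc) ∈ m.items := by
    intro x hx
    obtain ⟨q, hq, hq1⟩ := List.mem_map.mp hx
    have hf := List.mem_filter.mp hq
    have hq2 : q.2 = mc := beq_iff_eq.mp hf.2
    have hqe : q = (x, mc) := by
      rw [← hq1, ← hq2]
    rw [← hqe]
    exact hf.1
  have hboundlow : ∀ q ∈ m.items, q.2 ≤ mc := fun q hq =>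
    hmaxv q.2 (List.mem_map_of_mem hq)
  have hpm : (if 1 < (PySem.Dict.counter p.2).size ∧ (PySem.Dict.counter p.2).contains "" = true
      then (PySem.Dict.counter p.2).erase "" else PySem.Dict.counter p.2) = m := rfl
  have hgd : (PySem.List.max? m.values (fun c => c)).getD 0 = mc := by rw [hmc]; rfl
  simp only [pvStepA]
  rw [hm0, hpm, hgd]
  simp only [PySem.List.foldl_append_if, List.nil_append]
  rw [← hIMdef]
  by_cases hlen : IM.length = 1
  · rw [if_pos (by simpa using hlen)]
    obtain ⟨s, hs⟩ := List.length_eq_one_iff.mp hlen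
    rw [hs]
    rw [show (PySem.List.pyGet? [s] 0).getD "" = s from rfl]
    simp only [pv_ite_self]
    congr 1
    apply (pvBestOf_eq_of_max hMne (hIMspec s (by rw [hs]; simp)) ?_).symm
    intro q hq
    rcases lt_or_eq_of_le (hboundlow q hq) with hlt | heq
    · exact pvK_le_intro (Or.inl hlt)
    · have hqIM : q.1 ∈ IM :=
        List.mem_map_of_mem (List.mem_filter.mpr ⟨hq, beq_iff_eq.mpr heq⟩)
      rw [hs] at hqIM
      simp only [List.mem_singleton] at hqIM
      have hqe : q = (s, mc) := by rw [← hqIM, ← heq]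
      rw [hqe]
  · rw [if_neg (by simpa using hlen)]
    set srt := PySem.List.sorted IM (fun s => s) false with hsrt
    have hsrtne : srt ≠ [] := by
      rw [hsrt]
      intro hcon
      exact hIMne ((PySem.List.sorted_eq_nil_iff _ _ _).mp hcon)
    have hLLne : srt.map (fun i => PySem.Str.len i) ≠ [] :=
      fun hcon => hsrtne (List.map_eq_nil_iff.mp hcon)
    obtain ⟨ml, hml⟩ : ∃ ml, PySem.List.max? (srt.map (fun i => PySem.Str.len i))
        (fun n => n) = some ml := by
      cases hx : PySem.List.max? (srt.map (fun i => PySem.Str.len i)) (fun n => n) with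
      | none => exact absurd ((PySem.List.max?_eq_none_iff _ _).mp hx) hLLne
      | some y => exact ⟨y, rfl⟩
    have hmlmax : ∀ y ∈ srt.map (fun i => PySem.Str.len i), y ≤ ml :=
      PySem.List.max?_isMax hml
    have hmlmem : ml ∈ srt.map (fun i => PySem.Str.len i) := PySem.List.max?_mem hml
    have hgd2 : (PySem.List.max? (srt.map (fun i => PySem.Str.len i)) (fun n => n)).getD 0 = ml := by
      rw [hml]; rfl
    rw [hgd2]
    simp only [pv_ite_self]
    rw [PySem.List.foldl_if_eq_foldl_filter (fun item => PySem.Str.len item == ml)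
      (fun ad i => ad.insert p.1 i) srt a]
    set L := srt.filter (fun i => PySem.Str.len i == ml) with hL
    have hLne : L ≠ [] := by
      obtain ⟨i, hi, hie⟩ := List.mem_map.mp hmlmem
      intro hcon
      have hx : i ∈ L := List.mem_filter.mpr ⟨hi, beq_iff_eq.mpr hie⟩
      rw [hcon] at hx
      simp at hx
    rw [foldl_insert_const_key L hLne p.1 a]
    set s := L.getLast hLne with hsdef
    have hsL : s ∈ L := List.getLast_mem hLne
    have hs_srt : s ∈ srt := (List.mem_filter.mp hsL).1
    have hs_len : PySem.Str.len s = ml := beq_iff_eq.mp (List.mem_filter.mp hsL).2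
    have hs_IM : s ∈ IM := (PySem.List.mem_sorted _ _ _ _).mp hs_srt
    have hs_items : (s, mc) ∈ m.items := hIMspec s hs_IM
    have hpw : L.Pairwise (· ≤ ·) :=
      List.Pairwise.filter _ (by simpa using PySem.List.sorted_pairwise IM (fun s => s))
    congr 1
    apply (pvBestOf_eq_of_max hMne hs_items ?_).symm
    intro q hq
    rcases lt_or_eq_of_le (hboundlow q hq) with hlt | heq
    · exact pvK_le_intro (Or.inl hlt)
    · have hqIM : q.1 ∈ IM :=
        List.mem_map_of_mem (List.mem_filter.mpr ⟨hq, beq_iff_eq.mpr heq⟩)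
      have hq_srt : q.1 ∈ srt := (PySem.List.mem_sorted _ _ _ _).mpr hqIM
      have hqlen : PySem.Str.len q.1 ≤ ml := hmlmax _ (List.mem_map_of_mem hq_srt)
      rcases lt_or_eq_of_le hqlen with h2 | h2
      · exact pvK_le_intro (Or.inr ⟨heq, Or.inl (by rw [hs_len]; exact h2)⟩)
      · have hqL : q.1 ∈ L := List.mem_filter.mpr ⟨hq_srt, beq_iff_eq.mpr h2⟩
        have hqle : q.1 ≤ s := le_getLast_of_pairwise hpw hqL hLne
        exact pvK_le_intro (Or.inr ⟨heq, Or.inr ⟨by rw [hs_len, h2], hqle⟩⟩)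

-- ---- stage 1: the two first loops build pointwise-related dicts ----
def pvG (p : String × List String) : String × PySem.Dict String Int :=
  (p.1, PySem.Dict.counter p.2)

def pvInv (d : PySem.Dict String (List String)) (c : PySem.Dict String (PySem.Dict String Int)) : Prop :=
  c.items = d.items.map pvG ∧ ∀ p ∈ d.items, p.2 ≠ []

lemma get?_of_inv {d c} (h : pvInv d c) (k : String) :
    c.get? k = (d.get? k).map PySem.Dict.counter := by
  simp only [PySem.Dict.get?, h.1, List.find?_map]
  have hp : ((fun p : String × PySem.Dict String Int => p.1 == k) ∘ pvG) =
      (fun p : String × List String => p.1 == k) := rfl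
  rw [hp]
  cases List.find? (fun p : String × List String => p.1 == k) d.items <;> rfl

lemma contains_of_inv {d c} (h : pvInv d c) (k : String) :
    c.contains k = d.contains k := by
  simp only [PySem.Dict.contains, h.1, List.any_map]
  rfl

lemma counter_append_singleton_insert (l : List String) (v : String) :
    PySem.Dict.counter (l ++ [v]) =
      (PySem.Dict.counter l).insert v ((PySem.Dict.counter l).getD v 0 + 1) := by
  rw [← PySem.Dict.foldl_insert_getD_add_one_eq_counter,
      ← PySem.Dict.foldl_insert_getD_add_one_eq_counter, List.foldl_append]
  rfl

lemma inv_insert {d c} (h : pvInv d c) (k v : String) :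
    pvInv (d.insert k (d.getD k [] ++ [v]))
      (c.insert k ((c.getD k PySem.Dict.empty).insert v
        ((c.getD k PySem.Dict.empty).getD v 0 + 1))) := by
  have hcg : c.getD k PySem.Dict.empty = PySem.Dict.counter (d.getD k []) := by
    rw [PySem.Dict.getD_eq_get?_getD, PySem.Dict.getD_eq_get?_getD, get?_of_inv h k]
    cases d.get? k <;> rfl
  rw [hcg, ← counter_append_singleton_insert]
  have hcont := contains_of_inv h k
  constructor
  · show (c.insert k (PySem.Dict.counter (d.getD k [] ++ [v]))).items = _
    simp only [PySem.Dict.insert, hcont]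
    by_cases hdc : d.contains k = true
    · simp only [hdc, if_true, h.1, List.map_map]
      apply List.map_congr_left
      intro p _
      by_cases hpk : p.1 = k
      · simp [pvG, Function.comp, hpk]
      · simp [pvG, Function.comp, hpk]
    · simp [hdc, h.1, pvG]
  · intro p hp
    have hitems : (d.insert k (d.getD k [] ++ [v])).items =
        (if d.contains k = true then
          { items := d.items.map (fun p => if p.1 == k then (k, d.getD k [] ++ [v]) else p) :
              PySem.Dict String (List String) }
         else { items := d.items ++ [(k, d.getD k [] ++ [v])] }).items := by
      simp only [PySem.Dict.insert]
    rw [hitems] at hp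
    split_ifs at hp with hdc
    · obtain ⟨q, hq, hqe⟩ := List.mem_map.mp hp
      by_cases hqk : q.1 = k
      · simp only [hqk, beq_self_eq_true, if_true] at hqe
        rw [← hqe]
        simp
      · rw [if_neg (by simpa using hqk)] at hqe
        rw [← hqe]
        exact h.2 q hq
    · rcases List.mem_append.mp hp with hcase | hcase
      · exact h.2 p hcase
      · simp only [List.mem_singleton] at hcase
        rw [hcase]
        simp

lemma inv_fold (addresses : List (List (String × Option String))) {d c} (h : pvInv d c) :
    pvInv
      (addresses.foldl (fun d adr => adr.foldl (fun d iv =>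
        d.insert iv.1 (d.getD iv.1 [] ++ [iv.2.getD ""])) d) d)
      (addresses.foldl (fun cs adr => adr.foldl (fun cs kv =>
        let c := cs.getD kv.1 PySem.Dict.empty
        let val := kv.2.getD ""
        cs.insert kv.1 (c.insert val (c.getD val 0 + 1))) cs) c) := by
  induction addresses generalizing d c with
  | nil => exact h
  | cons adr rest ih =>
    refine ih ?_
    clear ih
    induction adr generalizing d c with
    | nil => exact h
    | cons kv t ih2 => exact ih2 (inv_insert h kv.1 (kv.2.getD ""))

-- ===== VERDICT (by name: the statement is the Claim_ definition above) =====
theorem getBestAddress_spec : Claim_equal_getBestAddress := by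
  intro addresses _
  show getBestAddress addresses = getBestAddress_alt addresses
  have hinv := inv_fold addresses (d := PySem.Dict.empty) (c := PySem.Dict.empty)
    ⟨rfl, by intro p hp; simp [PySem.Dict.empty] at hp⟩
  simp only [getBestAddress, getBestAddress_alt]
  rw [hinv.1, List.foldl_map]
  congr 1
  exact PySem.List.foldl_congr_mem _ _ _ _ (fun acc x hx => by
    rw [pvStepA_eq_insert acc x (hinv.2 x hx)]
    rfl)
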